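-- pv_equiv track=rewrite | github.com/AtreuhLaicram/pyCode | beautiful_word.py | solution
-- ===== SOURCE A (Python) =====
-- def solution(inputString):
--     w = {}
--     abcd = [chr(letter) for letter in range(97, 123)]
--     res = True
--     for mi in abcd:
--         if mi not in w:
--             w[mi] = 0
--     letlis = [l for l in inputString]
--     for d in letlis:
--         w[d] += 1
--     g = sorted(w.keys())
--     for r in range(len(g)):
--         if g[r] == 'a':
--             pass
--         elif w[g[r]] > w[g[r-1]]:
--             res = False
--             break
--     return res
-- ===== SOURCE B (Python) =====
-- def solution(inputString):
--     w = {chr(c): 0 for c in range(97, 123)}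
--     for ch in inputString:
--         w[ch] += 1
--     counts = [w[c] for c in sorted(w)]
--     return counts == sorted(counts, reverse=True)
-- ===== Notes on version B (the rewrite author's own statement) =====
-- stated objective: simpler
-- what changed: Keeps the letter-count dict (seeding it by comprehension instead of a membership-test loop, so the KeyError on non-letters is unchanged) but replaces the index-based pairwise scan with break over sorted keys by materialising the 26 counts in alphabetical order and testing equality with their reverse-sorted copy.
import Mathlib
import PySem

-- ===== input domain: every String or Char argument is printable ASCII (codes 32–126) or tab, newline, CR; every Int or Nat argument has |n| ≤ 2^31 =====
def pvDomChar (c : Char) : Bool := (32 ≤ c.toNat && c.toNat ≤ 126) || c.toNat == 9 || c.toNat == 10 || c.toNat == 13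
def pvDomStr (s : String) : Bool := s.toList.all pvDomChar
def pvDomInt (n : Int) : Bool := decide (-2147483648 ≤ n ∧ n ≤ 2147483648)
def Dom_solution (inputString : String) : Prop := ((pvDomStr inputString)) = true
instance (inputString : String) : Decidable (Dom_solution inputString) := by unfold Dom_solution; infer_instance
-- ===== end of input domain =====

-- B keeps the letter-count dict (KeyError on non-letters unchanged) but replaces the index-based pairwise scan over sorted keys by comparing the alphabetical count list with its reverse-sorted copy (same result, no speed claim).
-- Equivalence is about the RETURN value; neither program mutates its argument.

-- ===== PORT A =====
-- the loop 'for r in range(len(g)): …' with its break, over index list rs;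
-- g[r] / g[r-1] are ported with pyGetD (always in range here: r < len g, and r-1 is only
-- read when g[r] is not the first letter, i.e. r ≥ 1); dict lookups are ported with getD 0,
-- exact because under Pre_solution every key looked up is present (Python raises KeyError otherwise).
def solutionLoop (w : PySem.Dict Char Int) (g : List Char) : List Int → Bool
  | [] => true
  | r :: rs =>
    if PySem.List.pyGetD g r ' ' = 'a' then solutionLoop w g rs
    else if w.getD (PySem.List.pyGetD g r ' ') 0 > w.getD (PySem.List.pyGetD g (r - 1) ' ') 0 then false
    else solutionLoop w g rs

def solution (inputString : String) : Bool :=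
  let w0 : PySem.Dict Char Int := PySem.Dict.empty
  -- abcd = [chr(letter) for letter in range(97, 123)]; chr is exact here (97..122 are valid code points)
  let abcd : List Char := (PySem.List.pyRange 97 123 1).map (fun letter => Char.ofNat letter.toNat)
  -- for mi in abcd: if mi not in w: w[mi] = 0
  let w1 := abcd.foldl (fun w mi => if !(w.contains mi) then w.insert mi 0 else w) w0
  let letlis : List Char := inputString.toList.map (fun l => l)
  -- for d in letlis: w[d] += 1   (modify with default 0 is exact when the key is present; Pre_solution guarantees that)
  let w := letlis.foldl (fun w d => w.modify d 0 (· + 1)) w1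
  let g := PySem.List.sorted w.keys (fun x => x) false
  solutionLoop w g (PySem.List.pyRange 0 (g.length : Int) 1)

-- ===== PORT B =====
def solution_alt (inputString : String) : Bool :=
  -- w = {chr(c): 0 for c in range(97, 123)}; chr is exact here (97..122 are valid code points)
  let w0 : PySem.Dict Char Int := PySem.Dict.ofList ((PySem.List.pyRange 97 123 1).map (fun c => (Char.ofNat c.toNat, 0)))
  -- for ch in inputString: w[ch] += 1   (modify with default 0 is exact when the key is present; Pre_solution guarantees that)
  let w := inputString.toList.foldl (fun w ch => w.modify ch 0 (· + 1)) w0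
  -- counts = [w[c] for c in sorted(w)]
  let counts := (PySem.List.sorted w.keys (fun x => x) false).map (fun c => w.getD c 0)
  -- counts == sorted(counts, reverse=True)
  counts == PySem.List.sorted counts (fun x => x) true

-- ===== PRECONDITION & SPEC =====
-- Pre_ excludes exactly the inputs containing a character that is not a lowercase ASCII letter: on those A raises KeyError while incrementing the count dict (and so does B).
def Pre_solution (inputString : String) : Prop := (inputString.toList.all (fun c => 97 ≤ c.toNat && c.toNat ≤ 122)) = true
instance (inputString : String) : Decidable (Pre_solution inputString) := by unfold Pre_solution; infer_instance
def pvWitness_solution : String := ("aabc")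

def Spec_solution (inputString : String) (out : Bool) : Prop := out = solution_alt inputString
instance (inputString : String) (out : Bool) : Decidable (Spec_solution inputString out) := by unfold Spec_solution; infer_instance

-- ===== CLAIM (what is proved, stated in full; the proofs are below) =====
def Claim_equal_solution : Prop := ∀ (inputString : String), Dom_solution inputString → Pre_solution inputString → Spec_solution inputString (solution inputString)

-- ===== LEMMAS AND PROOFS =====

def abcdLemmaList : List Char := ['a','b','c','d','e','f','g','h','i','j','k','l','m','n','o','p','q','r','s','t','u','v','w','x','y','z']

lemma mem_abcdLemmaList (c : Char) (h1 : 97 ≤ c.toNat) (h2 : c.toNat ≤ 122) :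
    c ∈ abcdLemmaList := by
  have hc : Char.ofNat c.toNat = c := Char.ofNat_toNat c
  interval_cases h : c.toNat <;> rw [← hc] <;> decide

lemma eq_sorted_rev_iff (l : List Int) :
    (l = PySem.List.sorted l (fun x => x) true) ↔ List.IsChain (· ≥ ·) l := by
  constructor
  · intro h
    have hp := PySem.List.sorted_pairwise_rev l (fun x : Int => x)
    rw [← h] at hp
    exact List.isChain_iff_pairwise.mpr hp
  · intro h
    have hp : l.Pairwise (fun a b : Int => b ≤ a) := List.isChain_iff_pairwise.mp h
    exact (PySem.List.sorted_rev_eq_self_of_pairwise l (fun x : Int => x) hp).symm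

lemma getD_zero_of (l : List (Char × Int)) (h : ∀ p ∈ l, p.2 = 0) (c : Char) :
    (PySem.Dict.mk l).getD c 0 = 0 := by
  induction l with
  | nil => rfl
  | cons p rest ih =>
    rw [PySem.Dict.getD_eq_get?_getD, PySem.Dict.get?_mk_cons]
    split_ifs with hpc
    · simpa using h p (by simp)
    · rw [← PySem.Dict.getD_eq_get?_getD]
      exact ih (fun q hq => h q (by simp [hq]))

lemma getD_init (c : Char) :
    (PySem.Dict.mk [('a', 0), ('b', 0), ('c', 0), ('d', 0), ('e', 0), ('f', 0), ('g', 0), ('h', 0), ('i', 0), ('j', 0), ('k', 0), ('l', 0), ('m', 0), ('n', 0), ('o', 0), ('p', 0), ('q', 0), ('r', 0), ('s', 0), ('t', 0), ('u', 0), ('v', 0), ('w', 0), ('x', 0), ('y', 0), ('z', 0)] : PySem.Dict Char Int).getD c 0 = 0 := by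
  exact getD_zero_of _ (by decide) c

lemma chain_check (n0 n1 n2 n3 n4 n5 n6 n7 n8 n9 n10 n11 n12 n13 n14 n15 n16 n17 n18 n19 n20 n21 n22 n23 n24 n25 : Nat) :
    (!decide (n0 < n1) && (!decide (n1 < n2) && (!decide (n2 < n3) && (!decide (n3 < n4) && (!decide (n4 < n5) && (!decide (n5 < n6) && (!decide (n6 < n7) && (!decide (n7 < n8) && (!decide (n8 < n9) && (!decide (n9 < n10) && (!decide (n10 < n11) && (!decide (n11 < n12) && (!decide (n12 < n13) && (!decide (n13 < n14) && (!decide (n14 < n15) && (!decide (n15 < n16) && (!decide (n16 < n17) && (!decide (n17 < n18) && (!decide (n18 < n19) && (!decide (n19 < n20) && (!decide (n20 < n21) && (!decide (n21 < n22) && (!decide (n22 < n23) && (!decide (n23 < n24) && (!decide (n24 < n25))))))))))))))))))))))))))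
    = (([(n0 : Int), (n1 : Int), (n2 : Int), (n3 : Int), (n4 : Int), (n5 : Int), (n6 : Int), (n7 : Int), (n8 : Int), (n9 : Int), (n10 : Int), (n11 : Int), (n12 : Int), (n13 : Int), (n14 : Int), (n15 : Int), (n16 : Int), (n17 : Int), (n18 : Int), (n19 : Int), (n20 : Int), (n21 : Int), (n22 : Int), (n23 : Int), (n24 : Int), (n25 : Int)] : List Int) == PySem.List.sorted [(n0 : Int), (n1 : Int), (n2 : Int), (n3 : Int), (n4 : Int), (n5 : Int), (n6 : Int), (n7 : Int), (n8 : Int), (n9 : Int), (n10 : Int), (n11 : Int), (n12 : Int), (n13 : Int), (n14 : Int), (n15 : Int), (n16 : Int), (n17 : Int), (n18 : Int), (n19 : Int), (n20 : Int), (n21 : Int), (n22 : Int), (n23 : Int), (n24 : Int), (n25 : Int)] (fun x => x) true) := by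
  rw [Bool.eq_iff_iff, beq_iff_eq, eq_sorted_rev_iff]
  simp only [List.isChain_cons_cons, List.IsChain.singleton, and_true, ge_iff_le,
    Bool.and_eq_true, Bool.not_eq_true', decide_eq_false_iff_not]
  omega

-- ===== VERDICT (by name: the statement is the Claim_ definition above) =====
theorem solution_spec : Claim_equal_solution := by
  unfold Claim_equal_solution
  intro s _ hpre
  unfold Spec_solution solution solution_alt
  simp only []
  have habcd : (PySem.List.pyRange 97 123 1).map (fun letter => Char.ofNat letter.toNat) = abcdLemmaList := by decide
  have hw1 : abcdLemmaList.foldl (fun w mi => if !(w.contains mi) then w.insert mi 0 else w) PySem.Dict.empty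
      = (PySem.Dict.mk [('a', 0), ('b', 0), ('c', 0), ('d', 0), ('e', 0), ('f', 0), ('g', 0), ('h', 0), ('i', 0), ('j', 0), ('k', 0), ('l', 0), ('m', 0), ('n', 0), ('o', 0), ('p', 0), ('q', 0), ('r', 0), ('s', 0), ('t', 0), ('u', 0), ('v', 0), ('w', 0), ('x', 0), ('y', 0), ('z', 0)] : PySem.Dict Char Int) := by decide
  have hmap : s.toList.map (fun l => l) = s.toList := by simp
  have hw0B : PySem.Dict.ofList ((PySem.List.pyRange 97 123 1).map (fun c => (Char.ofNat c.toNat, (0 : Int))))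
      = (PySem.Dict.mk [('a', 0), ('b', 0), ('c', 0), ('d', 0), ('e', 0), ('f', 0), ('g', 0), ('h', 0), ('i', 0), ('j', 0), ('k', 0), ('l', 0), ('m', 0), ('n', 0), ('o', 0), ('p', 0), ('q', 0), ('r', 0), ('s', 0), ('t', 0), ('u', 0), ('v', 0), ('w', 0), ('x', 0), ('y', 0), ('z', 0)] : PySem.Dict Char Int) := by decide
  rw [habcd, hw1, hw0B, hmap]
  generalize hWg : s.toList.foldl (fun w d => PySem.Dict.modify w d 0 (· + 1)) (PySem.Dict.mk [('a', 0), ('b', 0), ('c', 0), ('d', 0), ('e', 0), ('f', 0), ('g', 0), ('h', 0), ('i', 0), ('j', 0), ('k', 0), ('l', 0), ('m', 0), ('n', 0), ('o', 0), ('p', 0), ('q', 0), ('r', 0), ('s', 0), ('t', 0), ('u', 0), ('v', 0), ('w', 0), ('x', 0), ('y', 0), ('z', 0)] : PySem.Dict Char Int) = W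
  have hkeys : W.keys = abcdLemmaList := by
    rw [← hWg, PySem.Dict.keys_foldl_modify]
    have hk0 : (PySem.Dict.mk [('a', 0), ('b', 0), ('c', 0), ('d', 0), ('e', 0), ('f', 0), ('g', 0), ('h', 0), ('i', 0), ('j', 0), ('k', 0), ('l', 0), ('m', 0), ('n', 0), ('o', 0), ('p', 0), ('q', 0), ('r', 0), ('s', 0), ('t', 0), ('u', 0), ('v', 0), ('w', 0), ('x', 0), ('y', 0), ('z', 0)] : PySem.Dict Char Int).keys = abcdLemmaList := by decide
    rw [hk0, PySem.Set.update_eq_append_filter]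
    have hnil : (PySem.Set.ofList s.toList).filter (fun y => !(PySem.Set.contains abcdLemmaList y)) = [] := by
      rw [List.filter_eq_nil_iff]
      intro y hy
      have hys : y ∈ s.toList := (PySem.Set.mem_ofList s.toList y).mp hy
      have hb := List.all_eq_true.mp hpre y hys
      simp only [Bool.and_eq_true, decide_eq_true_eq] at hb
      have hmem : y ∈ abcdLemmaList := mem_abcdLemmaList y hb.1 hb.2
      simpa using hmem
    rw [hnil, List.append_nil]
  have hcnt : ∀ c : Char, W.getD c 0 = (s.toList.count c : Int) := by
    intro c
    rw [← hWg, PySem.Dict.getD_foldl_modify_add_one, getD_init, zero_add]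
  rw [hkeys]
  have hsort : PySem.List.sorted abcdLemmaList (fun x => x) false = abcdLemmaList :=
    PySem.List.sorted_eq_self_of_pairwise abcdLemmaList (fun x : Char => x) (by decide)
  rw [hsort]
  have hr : PySem.List.pyRange 0 (abcdLemmaList.length : Int) 1 = ([0, 1, 2, 3, 4, 5, 6, 7, 8, 9, 10, 11, 12, 13, 14, 15, 16, 17, 18, 19, 20, 21, 22, 23, 24, 25] : List Int) := by decide
  rw [hr]
  have g0 : PySem.List.pyGetD abcdLemmaList (0) ' ' = 'a' := by decide
  have g1 : PySem.List.pyGetD abcdLemmaList (1) ' ' = 'b' := by decide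
  have g2 : PySem.List.pyGetD abcdLemmaList (2) ' ' = 'c' := by decide
  have g3 : PySem.List.pyGetD abcdLemmaList (3) ' ' = 'd' := by decide
  have g4 : PySem.List.pyGetD abcdLemmaList (4) ' ' = 'e' := by decide
  have g5 : PySem.List.pyGetD abcdLemmaList (5) ' ' = 'f' := by decide
  have g6 : PySem.List.pyGetD abcdLemmaList (6) ' ' = 'g' := by decide
  have g7 : PySem.List.pyGetD abcdLemmaList (7) ' ' = 'h' := by decide
  have g8 : PySem.List.pyGetD abcdLemmaList (8) ' ' = 'i' := by decide
  have g9 : PySem.List.pyGetD abcdLemmaList (9) ' ' = 'j' := by decide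
  have g10 : PySem.List.pyGetD abcdLemmaList (10) ' ' = 'k' := by decide
  have g11 : PySem.List.pyGetD abcdLemmaList (11) ' ' = 'l' := by decide
  have g12 : PySem.List.pyGetD abcdLemmaList (12) ' ' = 'm' := by decide
  have g13 : PySem.List.pyGetD abcdLemmaList (13) ' ' = 'n' := by decide
  have g14 : PySem.List.pyGetD abcdLemmaList (14) ' ' = 'o' := by decide
  have g15 : PySem.List.pyGetD abcdLemmaList (15) ' ' = 'p' := by decide
  have g16 : PySem.List.pyGetD abcdLemmaList (16) ' ' = 'q' := by decide
  have g17 : PySem.List.pyGetD abcdLemmaList (17) ' ' = 'r' := by decide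
  have g18 : PySem.List.pyGetD abcdLemmaList (18) ' ' = 's' := by decide
  have g19 : PySem.List.pyGetD abcdLemmaList (19) ' ' = 't' := by decide
  have g20 : PySem.List.pyGetD abcdLemmaList (20) ' ' = 'u' := by decide
  have g21 : PySem.List.pyGetD abcdLemmaList (21) ' ' = 'v' := by decide
  have g22 : PySem.List.pyGetD abcdLemmaList (22) ' ' = 'w' := by decide
  have g23 : PySem.List.pyGetD abcdLemmaList (23) ' ' = 'x' := by decide
  have g24 : PySem.List.pyGetD abcdLemmaList (24) ' ' = 'y' := by decide
  have g25 : PySem.List.pyGetD abcdLemmaList (25) ' ' = 'z' := by decide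
  simp [solutionLoop, g0, g1, g2, g3, g4, g5, g6, g7, g8, g9, g10, g11, g12, g13, g14, g15, g16, g17, g18, g19, g20, g21, g22, g23, g24, g25, hcnt]
  exact chain_check (List.count 'a' s.toList) (List.count 'b' s.toList) (List.count 'c' s.toList) (List.count 'd' s.toList) (List.count 'e' s.toList) (List.count 'f' s.toList) (List.count 'g' s.toList) (List.count 'h' s.toList) (List.count 'i' s.toList) (List.count 'j' s.toList) (List.count 'k' s.toList) (List.count 'l' s.toList) (List.count 'm' s.toList) (List.count 'n' s.toList) (List.count 'o' s.toList) (List.count 'p' s.toList) (List.count 'q' s.toList) (List.count 'r' s.toList) (List.count 's' s.toList) (List.count 't' s.toList) (List.count 'u' s.toList) (List.count 'v' s.toList) (List.count 'w' s.toList) (List.count 'x' s.toList) (List.count 'y' s.toList) (List.count 'z' s.toList)
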